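-- pv_equiv track=rewrite | github.com/arek-grows/Challenges | Challenges 201-220/Challenge204.py | uncensor
-- ===== SOURCE A (Python) =====
-- def uncensor(censored: str, vowels: str) -> str:
--     i = 0
--     uncensored = ''
--     for character in censored:
--         if character == '*':
--             character = vowels[i]
--             i += 1
--         uncensored += character
--     return uncensored  # Put your code here!!!
-- ===== SOURCE B (Python) =====
-- def uncensor(censored: str, vowels: str) -> str:
--     parts = censored.split('*')
--     pieces = [parts[0]]
--     for i in range(len(parts) - 1):
--         pieces.append(vowels[i])
--         pieces.append(parts[i + 1])
--     return ''.join(pieces)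
-- ===== Notes on version B (the rewrite author's own statement) =====
-- stated objective: faster
-- what changed: Replaces the per-character loop with string concatenation (quadratic in CPython) by split('*') into segments plus an indexed interleave with the vowels and a single ''.join.
import Mathlib
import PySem

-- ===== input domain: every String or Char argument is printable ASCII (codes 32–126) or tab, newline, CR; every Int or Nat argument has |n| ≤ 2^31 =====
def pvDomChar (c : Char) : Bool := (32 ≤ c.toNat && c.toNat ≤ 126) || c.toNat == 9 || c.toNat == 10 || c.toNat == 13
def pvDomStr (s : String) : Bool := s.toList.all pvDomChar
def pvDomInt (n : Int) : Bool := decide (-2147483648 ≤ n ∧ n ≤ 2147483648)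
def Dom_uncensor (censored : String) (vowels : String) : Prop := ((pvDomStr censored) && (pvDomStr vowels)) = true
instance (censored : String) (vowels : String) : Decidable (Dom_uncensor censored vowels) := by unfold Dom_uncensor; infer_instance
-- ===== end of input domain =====

-- B replaces A's per-character scan with quadratic string concatenation by split('*'),
-- an indexed interleave with the vowels and one ''.join (objective: faster in CPython).

-- ===== PORT A =====
-- literal port of A's loop body (the 'for character in censored' body); vowels[i] via pyGet?
-- (the .getD fallback is never reached inside Pre_, where Python never raises)
def uncensorStep (vs : List Char) (st : Int × List Char) (character : Char) : Int × List Char :=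
  if character = '*' then
    (st.1 + 1, st.2 ++ [(PySem.List.pyGet? vs st.1).getD character])
  else
    (st.1, st.2 ++ [character])

def uncensor (censored : String) (vowels : String) : String :=
  let st := censored.toList.foldl (uncensorStep vowels.toList) (0, [])
  String.mk st.2

-- ===== PORT B =====
-- literal port of Source B: split on '*', start from parts[0], append vowels[i] and parts[i+1], join
def uncensor_alt (censored : String) (vowels : String) : String :=
  let vs := vowels.toList
  let parts := PySem.Chars.splitOn censored.toList ['*']
  let pieces := (PySem.List.pyRange 0 ((parts.length : Int) - 1) 1).foldl
    (fun (acc : List (List Char)) i =>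
      acc ++ [[(PySem.List.pyGet? vs i).getD '*'], (PySem.List.pyGet? parts (i + 1)).getD []])
    [(PySem.List.pyGet? parts 0).getD []]
  String.mk (PySem.Chars.join [] pieces)

-- ===== PRECONDITION & SPEC =====
-- Pre_ excludes exactly the inputs where Python A raises IndexError ('*' count exceeds len(vowels));
-- Python B raises IndexError on the same inputs.
def Pre_uncensor (censored : String) (vowels : String) : Prop :=
  censored.toList.count '*' ≤ vowels.toList.length
instance (censored : String) (vowels : String) : Decidable (Pre_uncensor censored vowels) := by
  unfold Pre_uncensor; infer_instance

def pvWitness_uncensor : String × String := ("w*nd*rful", "oe")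

def Spec_uncensor (censored : String) (vowels : String) (out : String) : Prop := out = uncensor_alt censored vowels
instance (censored : String) (vowels : String) (out : String) : Decidable (Spec_uncensor censored vowels out) := by unfold Spec_uncensor; infer_instance

-- ===== CLAIM (what is proved, stated in full; the proofs are below) =====
def Claim_equal_uncensor : Prop := ∀ (censored : String) (vowels : String), Dom_uncensor censored vowels → Pre_uncensor censored vowels → Spec_uncensor censored vowels (uncensor censored vowels)

-- ===== LEMMAS AND PROOFS =====

-- simple recursive characterisation of splitting at '*'
def pvSplit : List Char → List (List Char)
  | [] => [[]]
  | c :: cs => if c = '*' then [] :: pvSplit cs else (pvSplit cs).modifyHead (c :: ·)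

theorem pvSplit_ne_nil (cs : List Char) : pvSplit cs ≠ [] := by
  induction cs with
  | nil => simp [pvSplit]
  | cons c cs ih =>
    simp only [pvSplit]
    split_ifs
    · simp
    · cases h : pvSplit cs with
      | nil => exact absurd h ih
      | cons p ps => simp

theorem pvSplit_length (cs : List Char) : (pvSplit cs).length = cs.count '*' + 1 := by
  induction cs with
  | nil => simp [pvSplit]
  | cons c cs ih =>
    by_cases h : c = '*'
    · simp [pvSplit, h, ih]
    · obtain ⟨p, ps, hps⟩ := List.exists_cons_of_ne_nil (pvSplit_ne_nil cs)
      simp [pvSplit, h, hps] at ih ⊢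
      omega

theorem pvSplit_go (fuel : Nat) (l cur : List Char) (acc : List (List Char))
    (h : l.length ≤ fuel) :
    PySem.Chars.splitOn.go ['*'] fuel l cur acc
      = acc.reverse ++ (pvSplit l).modifyHead (cur.reverse ++ ·) := by
  induction fuel generalizing l cur acc with
  | zero =>
    interval_cases hl : l.length
    · obtain rfl := List.length_eq_zero_iff.mp hl
      simp [PySem.Chars.splitOn.go, pvSplit]
  | succ fuel ih =>
    cases l with
    | nil => simp [PySem.Chars.splitOn.go, pvSplit]
    | cons c rest =>
      by_cases hc : c = '*'
      · subst hc
        have hp : List.isPrefixOf ['*'] ('*' :: rest) = true := by simp [List.isPrefixOf]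
        rw [PySem.Chars.splitOn.go] ; simp only [hp, if_true]
        rw [ih _ _ _ (by simpa using Nat.le_of_succ_le_succ h)]
        obtain ⟨p, ps, hps⟩ := List.exists_cons_of_ne_nil (pvSplit_ne_nil rest)
        simp [pvSplit, hps]
      · have hp : List.isPrefixOf ['*'] (c :: rest) = false := by
          simp [List.isPrefixOf]; exact fun hh => absurd hh.symm hc
        rw [PySem.Chars.splitOn.go] ; simp only [hp]
        rw [if_neg (by simp)]
        rw [ih _ _ _ (by simpa using Nat.le_of_succ_le_succ h)]
        obtain ⟨p, ps, hps⟩ := List.exists_cons_of_ne_nil (pvSplit_ne_nil rest)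
        simp [pvSplit, hc, hps]

theorem splitOn_eq_pvSplit (cs : List Char) :
    PySem.Chars.splitOn cs ['*'] = pvSplit cs := by
  have := pvSplit_go (cs.length + 1) cs [] [] (by omega)
  simp only [PySem.Chars.splitOn, this, List.reverse_nil, List.nil_append]
  obtain ⟨p, ps, hps⟩ := List.exists_cons_of_ne_nil (pvSplit_ne_nil cs)
  simp [hps]

-- the common value: replace each '*' by the next vowel, consuming the vowel list
def pvSpec : List Char → List Char → List Char
  | [], _ => []
  | c :: cs, vs => if c = '*' then vs.headD '*' :: pvSpec cs vs.tail else c :: pvSpec cs vs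

-- A's fold computes pvSpec
theorem uncensorA_fold (vs : List Char) (cs : List Char) (k : Nat) (acc : List Char)
    (h : k + cs.count '*' ≤ vs.length) :
    cs.foldl (uncensorStep vs) ((k : Int), acc)
      = (((k + cs.count '*' : Nat) : Int), acc ++ pvSpec cs (vs.drop k)) := by
  induction cs generalizing k acc with
  | nil => simp [pvSpec]
  | cons c cs ih =>
    by_cases hc : c = '*'
    · subst hc
      have hcnt : ('*' :: cs).count '*' = cs.count '*' + 1 := by simp
      have hk : k < vs.length := by omega
      have hget : PySem.List.pyGet? vs (k : Int) = some vs[k] := by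
        simp [PySem.List.pyGet?_natCast, List.getElem?_eq_getElem hk]
      have hstep : uncensorStep vs ((k : Int), acc) '*' = (((k + 1 : Nat) : Int), acc ++ [vs[k]]) := by
        unfold uncensorStep
        rw [if_pos rfl]
        rw [hget]
        norm_cast
      rw [List.foldl_cons, hstep, ih (k + 1) _ (by omega)]
      have hdrop : vs.drop k = vs[k] :: vs.drop (k + 1) :=
        (List.getElem_cons_drop hk).symm
      rw [hdrop]
      simp only [Prod.mk.injEq]
      constructor
      · norm_cast; omega
      · simp [pvSpec, List.append_assoc, List.getElem?_eq_getElem hk]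
    · have hcnt : (c :: cs).count '*' = cs.count '*' := by
        simp [hc]
      have hstep : uncensorStep vs ((k : Int), acc) c = ((k : Int), acc ++ [c]) := by
        unfold uncensorStep
        rw [if_neg hc]
      rw [List.foldl_cons, hstep, ih k _ (by omega), hcnt]
      simp [pvSpec, hc, List.append_assoc]

-- B's loop over range(len(parts)-1) builds the interleaved piece list
theorem uncensorB_loop (vs : List Char) (parts : List (List Char)) (init : List (List Char))
    (m : Nat) :
    (PySem.List.pyRange 0 (m : Int) 1).foldl
      (fun (acc : List (List Char)) i =>
        acc ++ [[(PySem.List.pyGet? vs i).getD '*'], (PySem.List.pyGet? parts (i + 1)).getD []])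
      init
      = init ++ (List.range m).flatMap
          (fun j => [[(vs[j]?).getD '*'], (parts[j + 1]?).getD []]) := by
  induction m with
  | zero => simp [PySem.List.pyRange_one_eq_nil]
  | succ m ih =>
    have hr : PySem.List.pyRange 0 ((m + 1 : Nat) : Int) 1
        = PySem.List.pyRange 0 (m : Int) 1 ++ [(m : Int)] := by
      push_cast
      exact PySem.List.pyRange_one_succ_right (by positivity)
    rw [hr, List.foldl_append, ih]
    have h1 : PySem.List.pyGet? vs (m : Int) = vs[m]? := PySem.List.pyGet?_natCast vs m
    have h2 : PySem.List.pyGet? parts ((m : Int) + 1) = parts[m + 1]? := by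
      have : (m : Int) + 1 = ((m + 1 : Nat) : Int) := by push_cast; ring
      rw [this, PySem.List.pyGet?_natCast]
    simp [h1, h2, List.range_succ]

-- interleaving the split parts with the vowels yields pvSpec
theorem pvSplit_interleave (cs vs : List Char) (h : cs.count '*' ≤ vs.length) :
    ((pvSplit cs)[0]?).getD []
      ++ (List.range (cs.count '*')).flatMap
          (fun j => ((vs[j]?).getD '*') :: ((pvSplit cs)[j + 1]?).getD [])
      = pvSpec cs vs := by
  induction cs generalizing vs with
  | nil => simp [pvSplit, pvSpec]
  | cons c cs ih =>
    by_cases hc : c = '*'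
    · subst hc
      have hcnt : ('*' :: cs).count '*' = cs.count '*' + 1 := by simp
      cases vs with
      | nil => rw [hcnt] at h; simp at h
      | cons v tl =>
        have hsplit : pvSplit ('*' :: cs) = [] :: pvSplit cs := by
          simp [pvSplit]
        have hspec : pvSpec ('*' :: cs) (v :: tl) = v :: pvSpec cs tl := by
          simp [pvSpec]
        have htl := ih tl (by rw [hcnt] at h; simpa using Nat.le_of_succ_le_succ h)
        rw [hsplit, hspec, hcnt, List.range_succ_eq_map, List.flatMap_cons, List.flatMap_map]
        simp only [List.getElem?_cons_zero, Option.getD_some, List.getElem?_cons_succ,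
          List.nil_append]
        rw [List.flatMap_congr (l := List.range (cs.count '*'))
          (g := fun j => ((tl[j]?).getD '*') :: ((pvSplit cs)[j + 1]?).getD [])
          (fun j _ => by simp)]
        rw [← htl]
        simp
    · obtain ⟨p, ps, hps⟩ := List.exists_cons_of_ne_nil (pvSplit_ne_nil cs)
      have hcnt : (c :: cs).count '*' = cs.count '*' := by simp [hc]
      have hsplit : pvSplit (c :: cs) = (c :: p) :: ps := by
        simp [pvSplit, hc, hps]
      have hspec : pvSpec (c :: cs) vs = c :: pvSpec cs vs := by
        simp [pvSpec, hc]
      have htl := ih vs (by omega)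
      rw [hsplit, hspec, hcnt]
      rw [List.flatMap_congr (l := List.range (cs.count '*'))
        (g := fun j => ((vs[j]?).getD '*') :: ((pvSplit cs)[j + 1]?).getD [])
        (fun j _ => by simp [hps])]
      rw [← htl]
      simp [hps]

theorem join_nil_eq_flatten (l : List (List Char)) :
    PySem.Chars.join [] l = l.flatten := by
  simp only [PySem.Chars.join]
  induction l with
  | nil => simp [List.intercalate]
  | cons p ps ih =>
    cases ps with
    | nil => simp [List.intercalate]
    | cons q qs =>
      simp only [List.intercalate, List.intersperse] at ih ⊢
      simp [ih, List.flatten]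

theorem flatten_flatMap' (l : List Nat) (f : Nat → List (List Char)) :
    (l.flatMap f).flatten = l.flatMap (fun x => (f x).flatten) := by
  induction l with
  | nil => simp
  | cons x xs ih => simp [ih]

-- ===== VERDICT (by name: the statement is the Claim_ definition above) =====
theorem uncensor_spec : Claim_equal_uncensor := by
  intro censored vowels _hdom hpre
  unfold Spec_uncensor
  simp only [uncensor, uncensor_alt]
  set cs := censored.toList
  set vs := vowels.toList
  have hpre' : cs.count '*' ≤ vs.length := hpre
  have hA := uncensorA_fold vs cs 0 [] (by simpa using hpre')
  norm_num at hA
  rw [splitOn_eq_pvSplit]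
  have hlen : ((pvSplit cs).length : Int) - 1 = ((cs.count '*' : Nat) : Int) := by
    rw [pvSplit_length]; push_cast; ring
  rw [hlen, uncensorB_loop, join_nil_eq_flatten, hA]
  congr 1
  simp only [List.flatten_append, List.flatten_cons, List.flatten_nil, List.append_nil]
  rw [flatten_flatMap']
  have : ∀ j : Nat, ([[(vs[j]?).getD '*'], ((pvSplit cs)[j + 1]?).getD []] : List (List Char)).flatten
      = ((vs[j]?).getD '*') :: ((pvSplit cs)[j + 1]?).getD [] := by
    intro j; simp
  rw [List.flatMap_congr (fun j _ => this j)]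
  rw [← pvSplit_interleave cs vs hpre']
  congr 1
  simp [PySem.List.pyGet?_zero]
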